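-- pv_equiv track=rewrite | github.com/Iroh02/northladder-asset-mapper | matcher.py | _detect_name_column
-- ===== SOURCE A (Python) =====
-- from typing import Dict, List, Callable, Optional, Tuple
--
-- CATEGORY_KEYWORDS = ['type', 'category', 'device type', 'device_type', 'devicetype', 'product type', 'product_type']
--
-- NAME_KEYWORDS = ['name', 'product', 'model', 'description', 'desc', 'foxway', 'device', 'item', 'asset', 'equipment']
--
-- NAME_EXCLUDE_KEYWORDS = ['id', 'serial', 'imei', 'barcode', 'sku', 'code', 'number']
--
-- def _detect_name_column(columns: List[str]) -> str:
--     """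
--     Detect the product name column.
--     Priority: model > name > product > description
--     Excludes category columns to prevent conflicts.
--     """
--     # Priority 1: Look for "model" keyword first
--     for col in columns:
--         col_lower = col.lower().strip()
--         if 'model' in col_lower and 'type' not in col_lower:
--             # Exclude ID-like columns (e.g., "Model Number", "Model ID")
--             if any(excl in col_lower for excl in NAME_EXCLUDE_KEYWORDS):
--                 continue
--             return col
--
--     # Priority 2: Look for other name keywords, but exclude category and ID columns
--     for col in columns:
--         col_lower = col.lower().strip()
--         col_normalized = col_lower.replace(' ', '_')
--
--         # Skip if this looks like a category column
--         if any(kw.replace(' ', '_') in col_normalized for kw in CATEGORY_KEYWORDS):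
--             continue
--
--         # Skip if this looks like an ID column (e.g., "Asset ID", "Serial Number")
--         if any(excl in col_lower for excl in NAME_EXCLUDE_KEYWORDS):
--             continue
--
--         # Check name keywords
--         if any(kw in col_lower for kw in NAME_KEYWORDS):
--             return col
--
--     return None
-- ===== SOURCE B (Python) =====
-- CATEGORY_KEYWORDS = ['type', 'category', 'device type', 'device_type', 'devicetype', 'product type', 'product_type']
-- NAME_KEYWORDS = ['name', 'product', 'model', 'description', 'desc', 'foxway', 'device', 'item', 'asset', 'equipment']
-- NAME_EXCLUDE_KEYWORDS = ['id', 'serial', 'imei', 'barcode', 'sku', 'code', 'number']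
--
-- def _detect_name_column(columns):
--     model_candidates = []
--     name_candidates = []
--     for col in columns:
--         cl = col.lower().strip()
--         if ('model' in cl and 'type' not in cl
--                 and not any(excl in cl for excl in NAME_EXCLUDE_KEYWORDS)):
--             model_candidates.append(col)
--         elif (not any(kw.replace(' ', '_') in cl.replace(' ', '_') for kw in CATEGORY_KEYWORDS)
--               and not any(excl in cl for excl in NAME_EXCLUDE_KEYWORDS)
--               and any(kw in cl for kw in NAME_KEYWORDS)):
--             name_candidates.append(col)
--     if model_candidates:
--         return model_candidates[0]
--     if name_candidates:
--         return name_candidates[0]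
--     return None
-- ===== Notes on version B (the rewrite author's own statement) =====
-- stated objective: alternative
-- what changed: Replaces A's two sequential scans (model loop, then name loop) with a single pass that classifies each column once into ordered model/name candidate lists, followed by a priority pick of the first candidate.
import Mathlib
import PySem

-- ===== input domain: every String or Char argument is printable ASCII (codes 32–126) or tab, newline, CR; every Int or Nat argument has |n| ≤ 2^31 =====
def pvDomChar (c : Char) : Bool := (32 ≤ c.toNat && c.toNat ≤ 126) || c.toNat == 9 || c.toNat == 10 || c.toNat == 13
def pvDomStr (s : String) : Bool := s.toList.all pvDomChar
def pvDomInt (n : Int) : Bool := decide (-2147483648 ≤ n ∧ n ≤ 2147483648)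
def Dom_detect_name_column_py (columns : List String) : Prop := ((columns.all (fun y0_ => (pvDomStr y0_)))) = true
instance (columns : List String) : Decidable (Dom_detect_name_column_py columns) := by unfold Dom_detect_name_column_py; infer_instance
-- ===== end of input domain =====

-- B replaces A's two sequential scans by a single pass classifying each column into
-- ordered model/name candidate lists, followed by a priority pick (objective: alternative).


-- ===== PORT A =====
def CATEGORY_KEYWORDS : List String := ["type", "category", "device type", "device_type", "devicetype", "product type", "product_type"]
def NAME_KEYWORDS : List String := ["name", "product", "model", "description", "desc", "foxway", "device", "item", "asset", "equipment"]
def NAME_EXCLUDE_KEYWORDS : List String := ["id", "serial", "imei", "barcode", "sku", "code", "number"]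

-- Priority-1 loop of A: first column containing 'model' (not 'type'), skipping ID-like columns
def pvLoop1 : List String → Option String
  | [] => none
  | col :: rest =>
    let col_lower := PySem.Str.strip (PySem.Str.lower col)
    if PySem.Str.isIn "model" col_lower && !(PySem.Str.isIn "type" col_lower) then
      if NAME_EXCLUDE_KEYWORDS.any (fun excl => PySem.Str.isIn excl col_lower) then
        pvLoop1 rest
      else some col
    else pvLoop1 rest

-- Priority-2 loop of A
def pvLoop2 : List String → Option String
  | [] => none
  | col :: rest =>
    let col_lower := PySem.Str.strip (PySem.Str.lower col)
    let col_normalized := PySem.Str.replace col_lower " " "_"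
    if CATEGORY_KEYWORDS.any (fun kw => PySem.Str.isIn (PySem.Str.replace kw " " "_") col_normalized) then
      pvLoop2 rest
    else if NAME_EXCLUDE_KEYWORDS.any (fun excl => PySem.Str.isIn excl col_lower) then
      pvLoop2 rest
    else if NAME_KEYWORDS.any (fun kw => PySem.Str.isIn kw col_lower) then
      some col
    else pvLoop2 rest

def detect_name_column_py (columns : List String) : Option String :=
  match pvLoop1 columns with
  | some col => some col
  | none => pvLoop2 columns

-- ===== PORT B =====
-- B's model-candidate test for a column
def pvIsModelCand (col : String) : Bool :=
  let cl := PySem.Str.strip (PySem.Str.lower col)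
  PySem.Str.isIn "model" cl && !(PySem.Str.isIn "type" cl)
    && !(NAME_EXCLUDE_KEYWORDS.any (fun excl => PySem.Str.isIn excl cl))

-- B's name-candidate test for a column
def pvIsNameCand (col : String) : Bool :=
  let cl := PySem.Str.strip (PySem.Str.lower col)
  !(CATEGORY_KEYWORDS.any (fun kw => PySem.Str.isIn (PySem.Str.replace kw " " "_") (PySem.Str.replace cl " " "_")))
    && !(NAME_EXCLUDE_KEYWORDS.any (fun excl => PySem.Str.isIn excl cl))
    && NAME_KEYWORDS.any (fun kw => PySem.Str.isIn kw cl)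

-- single-pass classification of one column into the accumulated candidate lists
def pvClassify (acc : List String × List String) (col : String) : List String × List String :=
  if pvIsModelCand col then (acc.1 ++ [col], acc.2)
  else if pvIsNameCand col then (acc.1, acc.2 ++ [col])
  else acc

def detect_name_column_py_alt (columns : List String) : Option String :=
  let cands := columns.foldl pvClassify ([], [])
  match cands.1.head? with
  | some col => some col
  | none =>
    match cands.2.head? with
    | some col => some col
    | none => none

-- ===== PRECONDITION & SPEC =====
def Spec_detect_name_column_py (columns : List String) (out : Option String) : Prop := out = detect_name_column_py_alt columns
instance (columns : List String) (out : Option String) : Decidable (Spec_detect_name_column_py columns out) := by unfold Spec_detect_name_column_py; infer_instance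

-- ===== CLAIM (what is proved, stated in full; the proofs are below) =====
def Claim_equal_detect_name_column_py : Prop := ∀ (columns : List String), Dom_detect_name_column_py columns → Spec_detect_name_column_py columns (detect_name_column_py columns)

-- ===== LEMMAS AND PROOFS =====

-- A's first loop is the first column passing B's model test
theorem pvLoop1_eq_find (columns : List String) : pvLoop1 columns = columns.find? pvIsModelCand := by
  induction columns with
  | nil => rfl
  | cons col rest ih =>
    simp only [pvLoop1, pvIsModelCand, List.find?]
    cases hb1 : (PySem.Str.isIn "model" (PySem.Str.strip (PySem.Str.lower col))
        && !(PySem.Str.isIn "type" (PySem.Str.strip (PySem.Str.lower col)))) <;>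
      cases hb2 : (NAME_EXCLUDE_KEYWORDS.any (fun excl => PySem.Str.isIn excl (PySem.Str.strip (PySem.Str.lower col)))) <;>
        simp only [hb1, hb2, ih, Bool.not_true, Bool.not_false, Bool.and_true, Bool.and_false, reduceIte] <;> simp

-- A's second loop is the first column passing B's name test
theorem pvLoop2_eq_find (columns : List String) : pvLoop2 columns = columns.find? pvIsNameCand := by
  induction columns with
  | nil => rfl
  | cons col rest ih =>
    simp only [pvLoop2, pvIsNameCand, List.find?]
    cases hb1 : (CATEGORY_KEYWORDS.any (fun kw => PySem.Str.isIn (PySem.Str.replace kw " " "_") (PySem.Str.replace (PySem.Str.strip (PySem.Str.lower col)) " " "_"))) <;>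
      cases hb2 : (NAME_EXCLUDE_KEYWORDS.any (fun excl => PySem.Str.isIn excl (PySem.Str.strip (PySem.Str.lower col)))) <;>
        cases hb3 : (NAME_KEYWORDS.any (fun kw => PySem.Str.isIn kw (PySem.Str.strip (PySem.Str.lower col)))) <;>
          simp only [hb1, hb2, hb3, ih, Bool.not_true, Bool.not_false, Bool.and_true, Bool.and_false, reduceIte] <;> simp

-- B's fold appends, in order, the model candidates and the non-model name candidates
theorem pvFold_eq_filter (columns : List String) (m n : List String) :
    columns.foldl pvClassify (m, n) =
      (m ++ columns.filter pvIsModelCand,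
       n ++ columns.filter (fun c => !pvIsModelCand c && pvIsNameCand c)) := by
  induction columns generalizing m n with
  | nil => simp
  | cons col rest ih =>
    simp only [List.foldl_cons, List.filter_cons, pvClassify]
    by_cases h1 : pvIsModelCand col = true
    · simp [h1, ih]
    · by_cases h2 : pvIsNameCand col = true
      · simp [h1, h2, ih]
      · simp [h1, h2, ih]

-- ===== VERDICT (by name: the statement is the Claim_ definition above) =====
theorem detect_name_column_py_spec : Claim_equal_detect_name_column_py := by
  intro columns _
  unfold Spec_detect_name_column_py detect_name_column_py detect_name_column_py_alt
  rw [pvLoop1_eq_find, pvLoop2_eq_find, pvFold_eq_filter]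
  simp only [List.nil_append]
  cases hm : (columns.filter pvIsModelCand).head? with
  | some c =>
    have hfind : columns.find? pvIsModelCand = some c := by
      rw [← List.head?_filter, hm]
    simp [hfind]
  | none =>
    have hnil : columns.filter pvIsModelCand = [] := List.head?_eq_none_iff.mp hm
    have hfind : columns.find? pvIsModelCand = none := by
      rw [← List.head?_filter, hm]
    have hall : ∀ c ∈ columns, ¬ pvIsModelCand c = true := List.filter_eq_nil_iff.mp hnil
    have heq : columns.filter (fun c => !pvIsModelCand c && pvIsNameCand c) = columns.filter pvIsNameCand := by
      apply List.filter_congr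
      intro c hc
      simp [Bool.eq_false_iff.mpr (hall c hc)]
    rw [hfind, heq, ← List.head?_filter]
    cases (columns.filter pvIsNameCand).head? <;> simp
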